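-- pv_equiv track=rewrite | github.com/mjcr88/v0-community-app-project | scripts/definitive_clean_sql.py | is_new_command
-- ===== SOURCE A (Python) =====
-- def is_new_command(line):
--     # Keywords that start a NEW statement, imply the previous one is finished
--     keywords = [
--         "CREATE", "DROP", "ALTER", "INSERT",
--         "UPDATE", "DELETE", "SELECT", "GRANT",
--         "REVOKE", "COMMENT", "SET", "RESET",
--         "DO", "beGIN", "COMMIT", "ROLLBACK"
--     ]
--     u_line = line.upper()
--     for k in keywords:
--         if u_line.startswith(k + " "):
--             return True
--     return False
-- ===== SOURCE B (Python) =====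
-- _KEYWORDS = frozenset([
--     "CREATE", "DROP", "ALTER", "INSERT",
--     "UPDATE", "DELETE", "SELECT", "GRANT",
--     "REVOKE", "COMMENT", "SET", "RESET",
--     "DO", "BEGIN", "COMMIT", "ROLLBACK",
-- ])
--
--
-- def is_new_command(line):
--     u_line = line.upper()
--     idx = u_line.find(' ')
--     return idx != -1 and u_line[:idx] in _KEYWORDS
-- ===== Notes on version B (the rewrite author's own statement) =====
-- stated objective: idiomatic
-- what changed: Replaces the 16-way per-keyword startswith loop by extracting the first space-delimited word once and testing it against a frozenset of keywords, and fixes the mixed-case 'beGIN' entry (which the uppercased line can never match) to 'BEGIN'.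
-- intended difference: On lines whose uppercase form starts with 'BEGIN ' A returns False (its keyword list holds the mixed-case literal 'beGIN', which the uppercased line can never start with) while B returns True, which is the intended behaviour since BEGIN starts a new SQL statement. — e.g. on is_new_command("BEGIN x"): A returns false, B returns true
import Mathlib
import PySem

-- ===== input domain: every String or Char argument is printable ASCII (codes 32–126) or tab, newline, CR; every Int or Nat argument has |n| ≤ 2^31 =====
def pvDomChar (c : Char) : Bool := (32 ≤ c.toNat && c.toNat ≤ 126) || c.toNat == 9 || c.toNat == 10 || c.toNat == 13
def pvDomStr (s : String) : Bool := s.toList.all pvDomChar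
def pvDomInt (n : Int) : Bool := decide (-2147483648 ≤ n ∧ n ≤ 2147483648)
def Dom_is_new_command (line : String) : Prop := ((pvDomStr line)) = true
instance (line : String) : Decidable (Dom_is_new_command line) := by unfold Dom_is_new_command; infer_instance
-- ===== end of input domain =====

-- B replaces A's per-keyword startswith loop by one first-word extraction plus a set
-- membership test, and uses the intended keyword "BEGIN" where A's list has "beGIN".

-- ===== PORT A =====
def is_new_command (line : String) : Bool :=
  let keywords : List String :=
    ["CREATE", "DROP", "ALTER", "INSERT",
     "UPDATE", "DELETE", "SELECT", "GRANT",
     "REVOKE", "COMMENT", "SET", "RESET",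
     "DO", "beGIN", "COMMIT", "ROLLBACK"]
  let u_line := PySem.Str.upper line
  -- for k in keywords: if u_line.startswith(k + " "): return True / return False
  keywords.any (fun k => PySem.Str.startswith u_line (k ++ " "))

-- ===== PORT B =====
def pvKeywordSet : PySem.Set String :=
  PySem.Set.ofList
    ["CREATE", "DROP", "ALTER", "INSERT",
     "UPDATE", "DELETE", "SELECT", "GRANT",
     "REVOKE", "COMMENT", "SET", "RESET",
     "DO", "BEGIN", "COMMIT", "ROLLBACK"]

def is_new_command_alt (line : String) : Bool :=
  let u_line := PySem.Str.upper line
  let idx := PySem.Str.find u_line " "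
  (idx != -1) && pvKeywordSet.contains (PySem.Str.slice u_line none (some idx))

-- ===== PRECONDITION & SPEC =====
-- On lines whose uppercase form starts with "BEGIN " A returns False (its keyword list
-- holds the mixed-case literal "beGIN", which the uppercased line can never start with)
-- while B returns True, which is intended: BEGIN starts a new SQL statement.
def D_is_new_command (line : String) : Prop :=
  PySem.Str.startswith (PySem.Str.upper line) "BEGIN " = true
instance (line : String) : Decidable (D_is_new_command line) := by
  unfold D_is_new_command; infer_instance

def Spec_is_new_command (line : String) (out : Bool) : Prop :=
  ¬ D_is_new_command line → out = is_new_command_alt line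
instance (line : String) (out : Bool) : Decidable (Spec_is_new_command line out) := by
  unfold Spec_is_new_command; infer_instance

def pvDiffWitness_is_new_command : String := "BEGIN x"
def pvDiffWitnessOut_is_new_command : Bool × Bool := (false, true)

-- ===== CLAIM (what is proved, stated in full; the proofs are below) =====
def Claim_unchanged_is_new_command : Prop :=
  ∀ (line : String), Dom_is_new_command line → Spec_is_new_command line (is_new_command line)
def Claim_changed_is_new_command : Prop :=
  Dom_is_new_command (pvDiffWitness_is_new_command) ∧
  D_is_new_command (pvDiffWitness_is_new_command) ∧
  is_new_command (pvDiffWitness_is_new_command) = pvDiffWitnessOut_is_new_command.1 ∧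
  is_new_command_alt (pvDiffWitness_is_new_command) = pvDiffWitnessOut_is_new_command.2 ∧
  pvDiffWitnessOut_is_new_command.1 ≠ pvDiffWitnessOut_is_new_command.2
def Claim_exact_is_new_command : Prop :=
  ∀ (line : String), Dom_is_new_command line → D_is_new_command line →
    is_new_command line ≠ is_new_command_alt line

-- ===== LEMMAS AND PROOFS =====

-- A's 15 genuinely-uppercase keywords, as char lists
def kw15 : List (List Char) :=
  ["CREATE".toList, "DROP".toList, "ALTER".toList, "INSERT".toList,
   "UPDATE".toList, "DELETE".toList, "SELECT".toList, "GRANT".toList,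
   "REVOKE".toList, "COMMENT".toList, "SET".toList, "RESET".toList,
   "DO".toList, "COMMIT".toList, "ROLLBACK".toList]

-- B's 16 keywords, as char lists
def kw16 : List (List Char) :=
  ["CREATE".toList, "DROP".toList, "ALTER".toList, "INSERT".toList,
   "UPDATE".toList, "DELETE".toList, "SELECT".toList, "GRANT".toList,
   "REVOKE".toList, "COMMENT".toList, "SET".toList, "RESET".toList,
   "DO".toList, "BEGIN".toList, "COMMIT".toList, "ROLLBACK".toList]

theorem upperChar_ne_b (c : Char) : PySem.Chars.upperChar c ≠ 'b' := by
  unfold PySem.Chars.upperChar PySem.Chars.islower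
  split
  · rename_i h
    simp only [decide_eq_true_eq, Bool.and_eq_true, Char.le_def, UInt32.le_iff_toNat_le] at h
    obtain ⟨h1, h2⟩ := h
    have e1 : ('a':Char).val.toNat = 97 := rfl
    have e2 : ('z':Char).val.toNat = 122 := rfl
    have e3 : c.val.toNat = c.toNat := rfl
    have hv : (c.toNat - 32).isValidChar := Or.inl (by omega)
    intro he
    have hx : (Char.ofNat (c.toNat - 32)).toNat = ('b' : Char).toNat := by rw [he]
    rw [Char.toNat_ofNat, if_pos hv] at hx
    have e4 : ('b':Char).toNat = 98 := rfl
    omega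
  · rename_i h
    intro he; rw [he] at h
    exact h (by decide)

-- "beGIN " is never a prefix of an uppercased string
theorem no_beGIN (l : List Char) : ¬ ("beGIN ".toList <+: PySem.Chars.upper l) := by
  intro h
  obtain ⟨t, ht⟩ := h
  unfold PySem.Chars.upper at ht
  cases l with
  | nil => simp at ht
  | cons c l' =>
    simp only [List.map_cons] at ht
    have : 'b' = PySem.Chars.upperChar c := by
      have := congrArg (fun xs => xs.head?) ht
      simpa using this
    exact upperChar_ne_b c this.symm

-- A = true  ↔  some kw15 keyword followed by a space is a prefix of the uppercased line
theorem A_iff (line : String) :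
    is_new_command line = true ↔
      ∃ k ∈ kw15, k ++ [' '] <+: PySem.Chars.upper line.toList := by
  unfold is_new_command
  simp only [List.any_eq_true, PySem.Str.startswith_eq, PySem.Chars.startswith_iff]
  constructor
  · rintro ⟨k, hk, hpre⟩
    rw [PySem.Str.toList_upper] at hpre
    fin_cases hk
    · exact ⟨"CREATE".toList, by simp [kw15], by simpa using hpre⟩
    · exact ⟨"DROP".toList, by simp [kw15], by simpa using hpre⟩
    · exact ⟨"ALTER".toList, by simp [kw15], by simpa using hpre⟩
    · exact ⟨"INSERT".toList, by simp [kw15], by simpa using hpre⟩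
    · exact ⟨"UPDATE".toList, by simp [kw15], by simpa using hpre⟩
    · exact ⟨"DELETE".toList, by simp [kw15], by simpa using hpre⟩
    · exact ⟨"SELECT".toList, by simp [kw15], by simpa using hpre⟩
    · exact ⟨"GRANT".toList, by simp [kw15], by simpa using hpre⟩
    · exact ⟨"REVOKE".toList, by simp [kw15], by simpa using hpre⟩
    · exact ⟨"COMMENT".toList, by simp [kw15], by simpa using hpre⟩
    · exact ⟨"SET".toList, by simp [kw15], by simpa using hpre⟩
    · exact ⟨"RESET".toList, by simp [kw15], by simpa using hpre⟩
    · exact ⟨"DO".toList, by simp [kw15], by simpa using hpre⟩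
    · exact absurd (by simpa using hpre) (no_beGIN line.toList)
    · exact ⟨"COMMIT".toList, by simp [kw15], by simpa using hpre⟩
    · exact ⟨"ROLLBACK".toList, by simp [kw15], by simpa using hpre⟩
  · rintro ⟨k, hk, hpre⟩
    fin_cases hk
    · exact ⟨"CREATE", by simp, by rw [PySem.Str.toList_upper]; simpa using hpre⟩
    · exact ⟨"DROP", by simp, by rw [PySem.Str.toList_upper]; simpa using hpre⟩
    · exact ⟨"ALTER", by simp, by rw [PySem.Str.toList_upper]; simpa using hpre⟩
    · exact ⟨"INSERT", by simp, by rw [PySem.Str.toList_upper]; simpa using hpre⟩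
    · exact ⟨"UPDATE", by simp, by rw [PySem.Str.toList_upper]; simpa using hpre⟩
    · exact ⟨"DELETE", by simp, by rw [PySem.Str.toList_upper]; simpa using hpre⟩
    · exact ⟨"SELECT", by simp, by rw [PySem.Str.toList_upper]; simpa using hpre⟩
    · exact ⟨"GRANT", by simp, by rw [PySem.Str.toList_upper]; simpa using hpre⟩
    · exact ⟨"REVOKE", by simp, by rw [PySem.Str.toList_upper]; simpa using hpre⟩
    · exact ⟨"COMMENT", by simp, by rw [PySem.Str.toList_upper]; simpa using hpre⟩
    · exact ⟨"SET", by simp, by rw [PySem.Str.toList_upper]; simpa using hpre⟩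
    · exact ⟨"RESET", by simp, by rw [PySem.Str.toList_upper]; simpa using hpre⟩
    · exact ⟨"DO", by simp, by rw [PySem.Str.toList_upper]; simpa using hpre⟩
    · exact ⟨"COMMIT", by simp, by rw [PySem.Str.toList_upper]; simpa using hpre⟩
    · exact ⟨"ROLLBACK", by simp, by rw [PySem.Str.toList_upper]; simpa using hpre⟩

theorem no_space_kw16 : ∀ k ∈ kw16, ' ' ∉ k := by decide

theorem pvKeywordSet_eq : pvKeywordSet =
    (["CREATE", "DROP", "ALTER", "INSERT",
      "UPDATE", "DELETE", "SELECT", "GRANT",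
      "REVOKE", "COMMENT", "SET", "RESET",
      "DO", "BEGIN", "COMMIT", "ROLLBACK"] : List String) := by decide

set_option maxHeartbeats 1600000 in
-- B = true  ↔  some kw16 keyword followed by a space is a prefix of the uppercased line
theorem B_iff (line : String) :
    is_new_command_alt line = true ↔
      ∃ k ∈ kw16, k ++ [' '] <+: PySem.Chars.upper line.toList := by
  unfold is_new_command_alt
  set U : List Char := PySem.Chars.upper line.toList with hU
  have hUeq : (PySem.Str.upper line).toList = U := PySem.Str.toList_upper line
  simp only [Bool.and_eq_true, bne_iff_ne, ne_eq]
  rw [PySem.Str.find_eq, hUeq]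
  show (¬ PySem.Chars.find U " ".toList = -1) ∧ _ ↔ _
  constructor
  · rintro ⟨hne, hmem⟩
    have hspec := PySem.Chars.findFrom_natCast_spec U " ".toList 0 (Nat.zero_le _)
    rw [Nat.cast_zero, PySem.Chars.findFrom_zero] at hspec
    obtain ⟨hge, hdrop, _⟩ := hspec hne
    set m : Nat := (PySem.Chars.find U " ".toList).toNat with hm
    -- the slice is U.take m
    have hslice : (PySem.Str.slice (PySem.Str.upper line) none
        (some (PySem.Chars.find U " ".toList))).toList = U.take m := by
      rw [PySem.Str.toList_slice, PySem.Chars.slice_eq_listSlice, hUeq,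
        PySem.List.slice_to _ hge]
    -- membership in the set gives a kw16 element
    unfold PySem.Set.contains at hmem
    rw [pvKeywordSet_eq, List.contains_iff_mem] at hmem
    have hmem' := hmem
    simp only [List.mem_cons, List.not_mem_nil, or_false] at hmem'
    have hk16 : U.take m ∈ kw16 := by
      rcases hmem' with h|h|h|h|h|h|h|h|h|h|h|h|h|h|h|h <;>
        · rw [← hslice, h]; simp [kw16]
    refine ⟨U.take m, hk16, ?_⟩
    obtain ⟨t, ht⟩ := hdrop
    have hsplit : U = U.take m ++ U.drop m := (List.take_append_drop m U).symm
    rw [← ht] at hsplit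
    refine ⟨t, ?_⟩
    conv_rhs => rw [hsplit]
    simp
  · rintro ⟨k, hk, hpre⟩
    obtain ⟨t, ht⟩ := hpre
    have hlen : k.length ≤ U.length := by
      rw [← ht]; simp
    -- U.drop k.length starts with ' '
    have hdropk : U.drop k.length = ' ' :: t := by
      rw [← ht, List.append_assoc]
      simp
    have hinf : " ".toList <:+: U := by
      refine ⟨U.take k.length, t, ?_⟩
      have := List.take_append_drop k.length U
      rw [hdropk] at this
      simpa using this
    have hne : PySem.Chars.find U " ".toList ≠ -1 :=
      (PySem.Chars.find_ne_neg_one_iff U " ".toList).mpr hinf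
    have hspec := PySem.Chars.findFrom_natCast_spec U " ".toList 0 (Nat.zero_le _)
    rw [Nat.cast_zero, PySem.Chars.findFrom_zero] at hspec
    obtain ⟨hge, hdrop, hmin⟩ := hspec hne
    set m : Nat := (PySem.Chars.find U " ".toList).toNat with hm
    -- m = k.length
    have hmle : m ≤ k.length := by
      by_contra hgt
      exact hmin k.length (Nat.zero_le _) (by omega) ⟨t, by simp [hdropk]⟩
    have hmeq : m = k.length := by
      rcases Nat.lt_or_ge m k.length with hlt | hge2
      · exfalso
        obtain ⟨t2, ht2⟩ := hdrop
        have hU2 : U[m]? = some ' ' := by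
          have h9 : (U.drop m).head? = some ' ' := by rw [← ht2]; simp
          rw [List.head?_drop] at h9
          exact h9
        have hk2 : U[m]? = k[m]? := by
          conv_lhs => rw [← ht]
          rw [List.append_assoc]
          exact List.getElem?_append_left hlt
        have hsp : ' ' ∈ k := List.mem_of_getElem? (by rw [← hk2, hU2])
        exact no_space_kw16 k hk hsp
      · omega
    constructor
    · exact hne
    · -- slice = U.take m = k
      have htake : U.take m = k := by
        rw [hmeq, ← ht, List.append_assoc]
        exact List.take_left
      have hslice : (PySem.Str.slice (PySem.Str.upper line) none
          (some (PySem.Chars.find U " ".toList))).toList = k := by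
        rw [PySem.Str.toList_slice, PySem.Chars.slice_eq_listSlice, hUeq,
          PySem.List.slice_to _ hge, htake]
      -- string with toList = k is one of the 16 keyword strings
      unfold PySem.Set.contains
      rw [pvKeywordSet_eq, List.contains_iff_mem]
      rcases (by simpa [kw16] using hk :
            k = "CREATE".toList ∨ k = "DROP".toList ∨ k = "ALTER".toList ∨
            k = "INSERT".toList ∨ k = "UPDATE".toList ∨ k = "DELETE".toList ∨
            k = "SELECT".toList ∨ k = "GRANT".toList ∨ k = "REVOKE".toList ∨
            k = "COMMENT".toList ∨ k = "SET".toList ∨ k = "RESET".toList ∨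
            k = "DO".toList ∨ k = "BEGIN".toList ∨ k = "COMMIT".toList ∨
            k = "ROLLBACK".toList) with h|h|h|h|h|h|h|h|h|h|h|h|h|h|h|h <;>
          · rw [h] at hslice
            have h2 := congrArg String.ofList hslice
            simp only [String.ofList_toList] at h2
            have e : (" " : String).toList = [' '] := by decide
            rw [e] at h2
            simp [h2]

-- ===== VERDICT (by name: the statement is the Claim_ definition above) =====
theorem is_new_command_spec : Claim_unchanged_is_new_command := by
  intro line _ hnD
  unfold D_is_new_command at hnD
  rw [PySem.Str.startswith_eq, PySem.Chars.startswith_iff] at hnD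
  rw [PySem.Str.toList_upper] at hnD
  apply Bool.eq_iff_iff.mpr
  rw [A_iff, B_iff]
  constructor
  · rintro ⟨k, hk, hpre⟩
    exact ⟨k, by revert hk; simp [kw15, kw16]; tauto, hpre⟩
  · rintro ⟨k, hk, hpre⟩
    rcases (by simpa [kw16] using hk :
        k = "CREATE".toList ∨ k = "DROP".toList ∨ k = "ALTER".toList ∨
        k = "INSERT".toList ∨ k = "UPDATE".toList ∨ k = "DELETE".toList ∨
        k = "SELECT".toList ∨ k = "GRANT".toList ∨ k = "REVOKE".toList ∨
        k = "COMMENT".toList ∨ k = "SET".toList ∨ k = "RESET".toList ∨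
        k = "DO".toList ∨ k = "BEGIN".toList ∨ k = "COMMIT".toList ∨
        k = "ROLLBACK".toList) with h|h|h|h|h|h|h|h|h|h|h|h|h|h|h|h
    all_goals subst h
    · exact ⟨_, by simp [kw15], hpre⟩
    · exact ⟨_, by simp [kw15], hpre⟩
    · exact ⟨_, by simp [kw15], hpre⟩
    · exact ⟨_, by simp [kw15], hpre⟩
    · exact ⟨_, by simp [kw15], hpre⟩
    · exact ⟨_, by simp [kw15], hpre⟩
    · exact ⟨_, by simp [kw15], hpre⟩
    · exact ⟨_, by simp [kw15], hpre⟩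
    · exact ⟨_, by simp [kw15], hpre⟩
    · exact ⟨_, by simp [kw15], hpre⟩
    · exact ⟨_, by simp [kw15], hpre⟩
    · exact ⟨_, by simp [kw15], hpre⟩
    · exact ⟨_, by simp [kw15], hpre⟩
    · exact absurd (by simpa using hpre) hnD
    · exact ⟨_, by simp [kw15], hpre⟩
    · exact ⟨_, by simp [kw15], hpre⟩

theorem is_new_command_changed : Claim_changed_is_new_command := by
  unfold Claim_changed_is_new_command; decide

theorem is_new_command_tight : Claim_exact_is_new_command := by
  intro line _ hD
  unfold D_is_new_command at hD
  rw [PySem.Str.startswith_eq, PySem.Chars.startswith_iff, PySem.Str.toList_upper] at hD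
  have hB : is_new_command_alt line = true := by
    rw [B_iff]
    exact ⟨"BEGIN".toList, by simp [kw16], by simpa using hD⟩
  have hA : is_new_command line = false := by
    rw [← Bool.not_eq_true, A_iff]
    rintro ⟨k, hk, hpre⟩
    have hcomp := List.prefix_or_prefix_of_prefix hpre hD
    revert hcomp
    fin_cases hk <;> decide
  rw [hA, hB]; simp
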